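-- pv_equiv track=rewrite | github.com/oftenliu/often-personattr | datafolder/reid_dataset/import_rap2.py | proc_label
-- ===== SOURCE A (Python) =====
-- def proc_label(labels,combine_attachment_flag = False):
--     labels_comebine = []
--     if combine_attachment_flag:
--         for idx in range(0,len(labels)):
--             if idx == 88: #and idx < 98:
--                 #Backpack  ShoulderBag   WaistBag ->  bag
--                 labels_comebine.append("attachment-Bag:1")
--
--                 #HandBag PlasticBag PaperBag -> 拎东西
--                 labels_comebine.append("attachment-HandBag:1")
--
--                 labels_comebine.append(labels[92])         #Box
--                 labels_comebine.append(labels[95])         #HandTrunk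
--                 labels_comebine.append(labels[96])         #Baby
--                 #舍弃attachment-Other
--                 #attrlist_comebine.append(attrlist[97])        #Other
--             elif idx > 88 and idx < 98:
--                 continue
--             else:
--                 labels_comebine.append(labels[idx])
--         return labels_comebine
--     else:
--         return labels
-- ===== SOURCE B (Python) =====
-- def proc_label(labels, combine_attachment_flag=False):
--     if not combine_attachment_flag:
--         return labels
--     if len(labels) <= 88:
--         return labels[:]
--     return (labels[:88]
--             + ["attachment-Bag:1", "attachment-HandBag:1",
--                labels[92], labels[95], labels[96]]
--             + labels[98:])
-- ===== Notes on version B (the rewrite author's own statement) =====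
-- stated objective: simpler
-- what changed: Replaces the per-index loop with continue/skip logic by a single slice-splice expression: labels[:88] + constants + picked elements + labels[98:], with a plain copy when the list is short.
import Mathlib
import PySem

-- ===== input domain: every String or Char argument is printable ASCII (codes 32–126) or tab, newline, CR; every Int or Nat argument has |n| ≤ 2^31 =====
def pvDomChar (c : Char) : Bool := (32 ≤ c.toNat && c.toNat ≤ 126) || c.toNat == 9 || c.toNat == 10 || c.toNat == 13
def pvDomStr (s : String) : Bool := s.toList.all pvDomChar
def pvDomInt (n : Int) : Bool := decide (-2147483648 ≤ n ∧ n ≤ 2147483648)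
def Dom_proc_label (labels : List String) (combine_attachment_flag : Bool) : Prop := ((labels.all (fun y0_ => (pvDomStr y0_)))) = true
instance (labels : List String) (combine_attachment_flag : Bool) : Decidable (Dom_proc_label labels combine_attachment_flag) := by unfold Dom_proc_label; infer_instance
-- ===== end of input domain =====

-- B replaces A's index loop with continue/skip logic by one slice-splice expression (objective: simpler).

-- ===== PORT A =====
-- the constants and picked elements appended at idx == 88 (indices 92/95/96 are in range under Pre_)
def procConsts (labels : List String) : List String :=
  ["attachment-Bag:1", "attachment-HandBag:1",
   labels.getD 92 "", labels.getD 95 "", labels.getD 96 ""]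

-- one iteration of A's loop body; indices of range(0, len) are naturals, so List.range/getD are exact here
def procStep (labels : List String) (acc : List String) (idx : Nat) : List String :=
  if idx = 88 then acc ++ procConsts labels
  else if 88 < idx ∧ idx < 98 then acc
  else acc ++ [labels.getD idx ""]

def proc_label (labels : List String) (combine_attachment_flag : Bool) : List String :=
  if combine_attachment_flag then
    (List.range labels.length).foldl (procStep labels) []
  else labels

-- ===== PORT B =====
def proc_label_alt (labels : List String) (combine_attachment_flag : Bool) : List String :=
  if combine_attachment_flag then
    if labels.length ≤ 88 then
      PySem.List.slice labels none none            -- labels[:]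
    else
      PySem.List.slice labels none (some 88)       -- labels[:88]
        ++ ["attachment-Bag:1", "attachment-HandBag:1",
            labels.getD 92 "", labels.getD 95 "", labels.getD 96 ""]
        ++ PySem.List.slice labels (some 98) none  -- labels[98:]
  else labels

-- ===== PRECONDITION & SPEC =====
-- Pre_ excludes exactly the inputs where A raises IndexError: flag set with 89 ≤ len(labels) ≤ 96
-- (labels[92]/[95]/[96] are read at idx 88 but out of range); B raises there too.
def Pre_proc_label (labels : List String) (combine_attachment_flag : Bool) : Prop :=
  combine_attachment_flag = true → (labels.length ≤ 88 ∨ 97 ≤ labels.length)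
instance (labels : List String) (combine_attachment_flag : Bool) : Decidable (Pre_proc_label labels combine_attachment_flag) := by unfold Pre_proc_label; infer_instance

def pvWitness_proc_label : List String × Bool := (["a", "b"], true)

def Spec_proc_label (labels : List String) (combine_attachment_flag : Bool) (out : List String) : Prop := out = proc_label_alt labels combine_attachment_flag
instance (labels : List String) (combine_attachment_flag : Bool) (out : List String) : Decidable (Spec_proc_label labels combine_attachment_flag out) := by unfold Spec_proc_label; infer_instance

-- ===== CLAIM (what is proved, stated in full; the proofs are below) =====
def Claim_equal_proc_label : Prop := ∀ (labels : List String) (combine_attachment_flag : Bool), Dom_proc_label labels combine_attachment_flag → Pre_proc_label labels combine_attachment_flag → Spec_proc_label labels combine_attachment_flag (proc_label labels combine_attachment_flag)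

-- ===== LEMMAS AND PROOFS =====

-- closed form for the first n iterations of A's loop (n within the list)
lemma procLoop_closed (labels : List String) (n : Nat) (h : n ≤ labels.length) :
    (List.range n).foldl (procStep labels) [] =
      if n ≤ 88 then labels.take n
      else labels.take 88 ++ procConsts labels ++ (labels.drop 98).take (n - 98) := by
  induction n with
  | zero => simp
  | succ n ih =>
    have hn : n ≤ labels.length := Nat.le_of_succ_le h
    have hlt : n < labels.length := h
    rw [List.range_succ, List.foldl_append, List.foldl_cons, List.foldl_nil, ih hn]
    by_cases h88 : n = 88
    · subst h88
      simp [procStep, List.take_add_one]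
    · by_cases hle : n ≤ 88
      · have hlt88 : n < 88 := Nat.lt_of_le_of_ne hle h88
        have : n + 1 ≤ 88 := hlt88
        simp only [procStep, if_neg h88, hle, if_pos, this]
        have : ¬ (88 < n ∧ n < 98) := by omega
        rw [if_neg this, List.take_add_one, List.getElem?_eq_getElem hlt]
        simp [List.getD_eq_getElem?_getD, List.getElem?_eq_getElem hlt]
      · have hgt : 88 < n := Nat.lt_of_not_le hle
        by_cases h98 : n < 98
        · have hskip : 88 < n ∧ n < 98 := ⟨hgt, h98⟩
          simp only [procStep, if_neg h88, if_pos hskip]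
          have e1 : ¬ n ≤ 88 := hle
          have e2 : ¬ n + 1 ≤ 88 := by omega
          rw [if_neg e1, if_neg e2]
          have : n - 98 = 0 := by omega
          have : n + 1 - 98 = 0 := by omega
          simp_all
        · have hskip : ¬ (88 < n ∧ n < 98) := by omega
          simp only [procStep, if_neg h88, if_neg hskip]
          have e1 : ¬ n ≤ 88 := hle
          have e2 : ¬ n + 1 ≤ 88 := by omega
          rw [if_neg e1, if_neg e2]
          have hsub : n + 1 - 98 = (n - 98) + 1 := by omega
          have hidx : n - 98 < (labels.drop 98).length := by
            simp [List.length_drop]; omega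
          have htake : (labels.drop 98).take (n - 98 + 1)
              = (labels.drop 98).take (n - 98) ++ ((labels.drop 98)[n - 98]?).toList :=
            List.take_add_one
          rw [hsub, htake, List.getElem?_eq_getElem hidx]
          have hdg : (labels.drop 98)[n - 98] = labels[n] := by
            rw [List.getElem_drop]
            congr 1
            omega
          simp [List.append_assoc, hdg, List.getD_eq_getElem?_getD,
                List.getElem?_eq_getElem hlt]

-- ===== VERDICT (by name: the statement is the Claim_ definition above) =====
theorem proc_label_spec : Claim_equal_proc_label := by
  intro labels flag _ hpre
  unfold Spec_proc_label proc_label proc_label_alt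
  cases flag with
  | false => simp
  | true =>
    rw [procLoop_closed labels labels.length (Nat.le_refl _)]
    rcases hpre rfl with hsmall | hbig
    · rw [if_pos hsmall, if_pos hsmall]
      simp [PySem.List.slice]
    · have h1 : ¬ labels.length ≤ 88 := by omega
      rw [if_neg h1, if_neg h1]
      have : (labels.drop 98).take (labels.length - 98) = labels.drop 98 := by
        apply List.take_of_length_le
        simp [List.length_drop]
      have e88 : PySem.List.slice labels none (some 88) = labels.take 88 := by simp [pysem]
      have e98 : PySem.List.slice labels (some 98) none = labels.drop 98 := by simp [pysem]
      rw [this, e88, e98]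
      simp [procConsts]
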